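-- pv_equiv track=rewrite | github.com/SeniorNoOne/hillel_python_basic | src/bookticket/tickets.py | find_cont_intervals
-- ===== SOURCE A (Python) =====
-- def find_cont_intervals(seq: list) -> list:
--     found_intervals = []
--     if seq:
--         start = prev_item = seq[0]
--         for item in seq[1::]:
--             if not item - prev_item == 1:
--                 found_intervals.append((start, prev_item))
--                 start = item
--             prev_item = item
--         found_intervals.append((start, prev_item))
--     return found_intervals
-- ===== SOURCE B (Python) =====
-- from itertools import groupby
--
--
-- def find_cont_intervals(seq: list) -> list:
--     found_intervals = []
--     for _, group in groupby(enumerate(seq), key=lambda pair: pair[1] - pair[0]):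
--         grp = list(group)
--         found_intervals.append((grp[0][1], grp[-1][1]))
--     return found_intervals
-- ===== Notes on version B (the rewrite author's own statement) =====
-- stated objective: idiomatic
-- what changed: Replaced the manual start/prev state machine with the standard itertools.groupby idiom grouping enumerate(seq) by value-minus-index, taking each group's first and last values as the interval endpoints.
import Mathlib
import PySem

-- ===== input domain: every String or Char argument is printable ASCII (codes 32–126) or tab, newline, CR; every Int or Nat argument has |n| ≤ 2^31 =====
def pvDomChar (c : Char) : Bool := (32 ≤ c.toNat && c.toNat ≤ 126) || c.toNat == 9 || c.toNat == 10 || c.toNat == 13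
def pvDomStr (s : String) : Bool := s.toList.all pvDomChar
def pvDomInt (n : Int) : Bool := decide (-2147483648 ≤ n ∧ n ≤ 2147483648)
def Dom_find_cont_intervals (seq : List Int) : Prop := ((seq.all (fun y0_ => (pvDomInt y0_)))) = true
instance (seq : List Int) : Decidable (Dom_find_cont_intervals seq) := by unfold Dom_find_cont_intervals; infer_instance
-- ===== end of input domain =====

-- B replaces A's manual start/prev loop by the groupby-on-(value - index) idiom; same O(n) cost, idiomatic.

-- ===== PORT A =====
def find_cont_intervals (seq : List Int) : List (Int × Int) :=
  match seq with
  | [] => []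
  | x :: xs =>
    -- start = prev_item = seq[0]; for item in seq[1::]: …
    let st := xs.foldl
      (fun (st : List (Int × Int) × Int × Int) item =>
        let (acc, start, prev) := st
        if ¬ (item - prev == 1) then (acc ++ [(start, prev)], item, item)
        else (acc, start, item))
      ([], x, x)
    st.1 ++ [(st.2.1, st.2.2)]

-- ===== PORT B =====
-- itertools.groupby(enumerate(seq), key = value - index): consecutive elements with equal key
-- form one group (span of the key predicate), exactly as groupby consumes the iterator.
def pvGroupBy : List (Int × Int) → List (List (Int × Int))
  | [] => []
  | p :: rest =>
    (p :: rest.takeWhile (fun q => q.2 - q.1 == p.2 - p.1)) ::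
      pvGroupBy (rest.dropWhile (fun q => q.2 - q.1 == p.2 - p.1))
termination_by l => l.length
decreasing_by
  simp only [List.length_cons]
  exact Nat.lt_succ_of_le (List.length_dropWhile_le _ _)

def find_cont_intervals_alt (seq : List Int) : List (Int × Int) :=
  -- grp[0][1], grp[-1][1]; groups are nonempty by construction, defaults never used
  (pvGroupBy (PySem.List.enumerate seq)).map
    (fun grp => ((grp.headD (0, 0)).2, (grp.getLastD (0, 0)).2))

-- ===== PRECONDITION & SPEC =====
def Spec_find_cont_intervals (seq : List Int) (out : List (Int × Int)) : Prop := out = find_cont_intervals_alt seq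
instance (seq : List Int) (out : List (Int × Int)) : Decidable (Spec_find_cont_intervals seq out) := by unfold Spec_find_cont_intervals; infer_instance

-- ===== CLAIM (what is proved, stated in full; the proofs are below) =====
def Claim_equal_find_cont_intervals : Prop := ∀ (seq : List Int), Dom_find_cont_intervals seq → Spec_find_cont_intervals seq (find_cont_intervals seq)

-- ===== LEMMAS AND PROOFS =====

-- reference recursion: runs start prev xs = the intervals A emits from state (start, prev) over xs
def pvRuns (start prev : Int) : List Int → List (Int × Int)
  | [] => [(start, prev)]
  | x :: xs => if x - prev = 1 then pvRuns start x xs else (start, prev) :: pvRuns x x xs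

-- the start argument only affects the first component of the first pair
theorem pvRuns_start (s t p : Int) (xs : List Int) :
    pvRuns s p xs = (s, ((pvRuns t p xs).headD (0, 0)).2) :: (pvRuns t p xs).tail := by
  induction xs generalizing s t p with
  | nil => simp [pvRuns]
  | cons x xs ih =>
    simp only [pvRuns]
    split_ifs with h
    · exact ih s t x
    · simp

-- A's fold accumulates exactly pvRuns
theorem foldA_eq (xs : List Int) (acc : List (Int × Int)) (s p : Int) :
    (let st := xs.foldl
      (fun (st : List (Int × Int) × Int × Int) item =>
        let (acc, start, prev) := st
        if ¬ (item - prev == 1) then (acc ++ [(start, prev)], item, item)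
        else (acc, start, item)) (acc, s, p)
     st.1 ++ [(st.2.1, st.2.2)]) = acc ++ pvRuns s p xs := by
  induction xs generalizing acc s p with
  | nil => simp [pvRuns]
  | cons x xs ih =>
    simp only [List.foldl_cons]
    by_cases h : x - p = 1
    · simpa [h, pvRuns] using ih acc s x
    · have := ih (acc ++ [(s, p)]) x x
      simp only [beq_iff_eq, h, not_false_iff, if_pos] at this ⊢
      simp only [this, pvRuns, h, if_false, List.append_assoc, List.singleton_append]

-- pvGroupBy on a cons whose head key matches the next element's key prepends into the first group
theorem pvGroupBy_cons_eq (i x : Int) (rest : List (Int × Int)) (q : Int × Int) (tl : List (Int × Int))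
    (hrest : rest = q :: tl) (hkey : q.2 - q.1 = x - i) :
    pvGroupBy ((i, x) :: rest) =
      ((i, x) :: (pvGroupBy rest).headD []) :: (pvGroupBy rest).tail := by
  subst hrest
  simp only [pvGroupBy, List.takeWhile, List.dropWhile, hkey]
  simp

-- main lemma: B on an enumeration starting anywhere computes pvRuns
theorem gb_eq_runs (xs : List Int) (i x : Int) :
    (pvGroupBy ((i, x) :: PySem.List.enumerate xs (i + 1))).map
      (fun grp => ((grp.headD (0, 0)).2, (grp.getLastD (0, 0)).2)) = pvRuns x x xs := by
  induction xs generalizing i x with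
  | nil => simp [PySem.List.enumerate, pvGroupBy, pvRuns]
  | cons y ys ih =>
    rw [PySem.List.enumerate_cons]
    by_cases h : y - x = 1
    · -- keys equal: (i+1,y) has key y-(i+1) = x-i
      have hkey : (i + 1, y).2 - (i + 1, y).1 = x - i := by simp; omega
      rw [pvGroupBy_cons_eq i x _ (i + 1, y) _ rfl hkey]
      have IH := ih (i + 1) y
      -- structure of the groups of the tail
      have hne : pvGroupBy ((i + 1, y) :: PySem.List.enumerate ys (i + 1 + 1)) ≠ [] := by
        simp [pvGroupBy]
      obtain ⟨g, gs, hg⟩ := List.exists_cons_of_ne_nil hne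
      have hghead : ∃ g', g = (i + 1, y) :: g' := by
        have : pvGroupBy ((i + 1, y) :: PySem.List.enumerate ys (i + 1 + 1)) =
          ((i + 1, y) :: (PySem.List.enumerate ys (i + 1 + 1)).takeWhile
            (fun q => q.2 - q.1 == (i + 1, y).2 - (i + 1, y).1)) ::
            pvGroupBy ((PySem.List.enumerate ys (i + 1 + 1)).dropWhile
            (fun q => q.2 - q.1 == (i + 1, y).2 - (i + 1, y).1)) := by
          rw [pvGroupBy]
        rw [this] at hg
        have := (List.cons_eq_cons.mp hg).1
        exact ⟨_, this.symm⟩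
      obtain ⟨g', hg'⟩ := hghead
      rw [hg] at IH ⊢
      subst hg'
      -- rewrite pvRuns on the cons
      have hruns : pvRuns x x (y :: ys) = pvRuns x y ys := by simp [pvRuns, h]
      rw [hruns, pvRuns_start x y y ys, ← IH]
      simp only [List.map_cons, List.headD_cons, List.tail_cons]
      cases g' with
      | nil => simp
      | cons a as => simp
    · -- keys differ: new group [(i,x)]
      have hkey : ¬ ((i + 1, y).2 - (i + 1, y).1 == (i, x).2 - (i, x).1) = true := by
        simp; omega
      have : pvGroupBy ((i, x) :: (i + 1, y) :: PySem.List.enumerate ys (i + 1 + 1)) =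
          [(i, x)] :: pvGroupBy ((i + 1, y) :: PySem.List.enumerate ys (i + 1 + 1)) := by
        conv_lhs => rw [pvGroupBy]
        simp only [List.takeWhile, List.dropWhile, hkey]
      rw [this]
      have IH := ih (i + 1) y
      simp only [List.map_cons, IH]
      simp [pvRuns, h]

-- ===== VERDICT (by name: the statement is the Claim_ definition above) =====
theorem find_cont_intervals_spec : Claim_equal_find_cont_intervals := by
  intro seq _
  unfold Spec_find_cont_intervals find_cont_intervals find_cont_intervals_alt
  cases seq with
  | nil => simp [PySem.List.enumerate, pvGroupBy]
  | cons x xs =>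
    rw [PySem.List.enumerate_cons]
    have hA := foldA_eq xs [] x x
    simp only [List.nil_append] at hA
    simp only [hA]
    exact (gb_eq_runs xs 0 x).symm
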